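-- pv_equiv track=rewrite | github.com/pypi-data/pypi-mirror-334 | packages/sysflow/sysflow-0.1.18-py3-none-any.whl/sysflow/web/arxiv/arxate.py | clean_key
-- ===== SOURCE A (Python) =====
-- def clean_key(bib_string):
--     # clean the key due to the accent
--     # some issue with the parse_string
--     #
--     # e.g.
--     # @article{s{\o}rdal2019deep,
--     # author = "S{\o}rdal, Vegard B. and Bergli, Joakim",
--     # doi = "10.1103/physreva.100.042314",
--     # url = "https://doi.org/10.1103%2Fphysreva.100.042314",
--     # year = "2019",
--     # month = "oct",
--     # publisher = "American Physical Society ({APS})",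
--     # volume = "100",
--     # number = "4",
--     # title = "Deep reinforcement learning for quantum Szilard engine optimization",
--     # journal = "Physical Review A"
--     # }
--     bib_string_list = bib_string.lstrip().split('\n')
--     head_string = bib_string_list[0]
--     new_head_string_list = []
--     IsKey = False
--     for s in head_string:
--         if IsKey == False:
--             if s == '{': IsKey = True
--         else:
--             if s == '{' or s == '\\' or s == '}':
--                 continue
--         new_head_string_list.append(s)
--     new_head_string = ''.join(new_head_string_list)
--     bib_string_list[0] = new_head_string
--     bib_string = '\n'.join(bib_string_list)
--     return bib_string
-- ===== SOURCE B (Python) =====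
-- def clean_key(bib_string):
--     # Two phases: locate the first '{' on the head line, then bulk-strip
--     # '{', '}' and '\\' from the tail after it; prefix (incl. the brace) kept verbatim.
--     lines = bib_string.lstrip().split('\n')
--     head = lines[0]
--     idx = head.find('{')
--     if idx != -1:
--         head = head[:idx + 1] + head[idx + 1:].translate(str.maketrans('', '', '{}\\'))
--     lines[0] = head
--     return '\n'.join(lines)
-- ===== Notes on version B (the rewrite author's own statement) =====
-- stated objective: simpler
-- what changed: Replaced A's per-character IsKey flag loop over the head line by two separate phases: locate the first opening brace with str.find, keep the prefix through it verbatim, and bulk-strip braces and backslashes from the tail with str.translate.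
import Mathlib
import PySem

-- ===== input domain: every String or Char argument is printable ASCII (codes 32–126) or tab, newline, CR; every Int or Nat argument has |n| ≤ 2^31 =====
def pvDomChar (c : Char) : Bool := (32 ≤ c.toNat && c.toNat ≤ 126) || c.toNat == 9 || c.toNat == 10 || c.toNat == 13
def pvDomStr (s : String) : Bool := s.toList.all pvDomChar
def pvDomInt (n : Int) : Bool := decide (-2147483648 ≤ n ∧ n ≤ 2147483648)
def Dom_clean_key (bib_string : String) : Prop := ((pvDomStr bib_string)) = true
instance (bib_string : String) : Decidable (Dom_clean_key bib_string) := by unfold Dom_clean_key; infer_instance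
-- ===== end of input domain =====

-- B replaces A's per-character IsKey flag loop over the head line by two phases:
-- find the first '{', keep the prefix through it verbatim, and bulk-filter '{' '}' '\' from the tail (objective: simpler).

-- ===== PORT A =====
-- A's per-char loop over head_string with the IsKey flag, as structural recursion on the char list.
def cleanKeyLoopA : Bool → List Char → List Char
  | _, [] => []
  | false, c :: cs => if c = '{' then c :: cleanKeyLoopA true cs else c :: cleanKeyLoopA false cs
  | true, c :: cs =>
      if c = '{' ∨ c = '\\' ∨ c = '}' then cleanKeyLoopA true cs else c :: cleanKeyLoopA true cs

def clean_key (bib_string : String) : String :=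
  match (PySem.Str.split? (PySem.Str.lstrip bib_string) "\n").getD [] with
  | [] => ""   -- unreachable: split always returns a nonempty list
  | head :: rest =>
      PySem.Str.join "\n" (String.ofList (cleanKeyLoopA false head.toList) :: rest)

-- ===== PORT B =====
-- head.find('{'); if found, keep head[:idx+1] and filter '{' '}' '\' out of head[idx+1:].
def cleanKeyHeadB (head : String) : String :=
  let cs := head.toList
  let idx := PySem.Chars.find cs ['{']
  if idx = -1 then head
  else
    String.ofList (PySem.List.slice cs none (some (idx + 1)) ++
      (PySem.List.slice cs (some (idx + 1)) none).filter
        (fun c => !(c = '{' || c = '}' || c = '\\')))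

def clean_key_alt (bib_string : String) : String :=
  match (PySem.Str.split? (PySem.Str.lstrip bib_string) "\n").getD [] with
  | [] => ""   -- unreachable: split always returns a nonempty list
  | head :: rest => PySem.Str.join "\n" (cleanKeyHeadB head :: rest)

-- ===== PRECONDITION & SPEC =====
def Spec_clean_key (bib_string : String) (out : String) : Prop := out = clean_key_alt bib_string
instance (bib_string : String) (out : String) : Decidable (Spec_clean_key bib_string out) := by unfold Spec_clean_key; infer_instance

-- ===== CLAIM (what is proved, stated in full; the proofs are below) =====
def Claim_equal_clean_key : Prop := ∀ (bib_string : String), Dom_clean_key bib_string → Spec_clean_key bib_string (clean_key bib_string)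

-- ===== LEMMAS AND PROOFS =====

theorem loopA_true (cs : List Char) :
    cleanKeyLoopA true cs = cs.filter (fun c => !(c = '{' || c = '}' || c = '\\')) := by
  induction cs with
  | nil => rfl
  | cons c cs ih =>
      simp only [cleanKeyLoopA, List.filter]
      by_cases h1 : c = '{' <;> by_cases h2 : c = '}' <;> by_cases h3 : c = '\\' <;>
        simp [h1, h2, h3, ih]

theorem loopA_no_brace (cs : List Char) (h : '{' ∉ cs) : cleanKeyLoopA false cs = cs := by
  induction cs with
  | nil => rfl
  | cons c cs ih =>
      simp only [List.mem_cons, not_or] at h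
      have h1 : ¬ c = '{' := fun e => h.1 e.symm
      simp [cleanKeyLoopA, h1, ih h.2]

theorem loopA_split (xs ys : List Char) (h : '{' ∉ xs) :
    cleanKeyLoopA false (xs ++ '{' :: ys) =
      xs ++ '{' :: ys.filter (fun c => !(c = '{' || c = '}' || c = '\\')) := by
  induction xs with
  | nil => simp [cleanKeyLoopA, loopA_true]
  | cons x xs ih =>
      simp only [List.mem_cons, not_or] at h
      have h1 : ¬ x = '{' := fun e => h.1 e.symm
      simp [cleanKeyLoopA, h1, ih h.2]

theorem singleton_infix_iff (c : Char) (cs : List Char) : [c] <:+: cs ↔ c ∈ cs := by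
  constructor
  · intro h; exact h.subset (by simp)
  · intro h
    obtain ⟨i, hi, hget⟩ := List.getElem_of_mem h
    exact ⟨cs.take i, cs.drop (i + 1), by
      rw [← hget]
      simp⟩

theorem headA_eq_headB (head : String) :
    String.ofList (cleanKeyLoopA false head.toList) = cleanKeyHeadB head := by
  unfold cleanKeyHeadB
  by_cases hmem : '{' ∈ head.toList
  · have hfind : PySem.Chars.find head.toList ['{'] ≠ -1 := by
      rw [PySem.Chars.find_ne_neg_one_iff, singleton_infix_iff]; exact hmem
    have hnn : 0 ≤ PySem.Chars.find head.toList ['{'] := by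
      rw [PySem.Chars.find_nonneg_iff, singleton_infix_iff]; exact hmem
    obtain ⟨hpref, hmin⟩ := PySem.Chars.find_spec (s := head.toList) (sub := ['{']) hnn
    set i := (PySem.Chars.find head.toList ['{']).toNat with hi
    have hidx : PySem.Chars.find head.toList ['{'] = (i : Int) := by omega
    have hilen : i < head.toList.length := by
      by_contra hle
      rw [List.drop_eq_nil_of_le (by omega)] at hpref
      simp at hpref
    have hgetI : head.toList[i] = '{' := by
      obtain ⟨t, ht⟩ := hpref
      have := congrArg (fun l => l.head?) ht
      simpa [List.head?_drop, List.getElem?_eq_getElem hilen] using this.symm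
    have hdrop : head.toList.drop i = '{' :: head.toList.drop (i + 1) := by
      rw [← hgetI]
      simp [List.getElem_cons_drop]
    have htake : '{' ∉ head.toList.take i := by
      intro hmem'
      obtain ⟨j, hj, hget⟩ := List.getElem_of_mem hmem'
      simp only [List.length_take] at hj
      have hj' : j < i := lt_of_lt_of_le hj (min_le_left _ _)
      apply hmin j hj'
      have hjl : j < head.toList.length := lt_of_lt_of_le hj' (le_of_lt hilen)
      have hgj : head.toList[j] = '{' := by
        rw [← hget]; simp [List.getElem_take]
      exact ⟨head.toList.drop (j + 1), by rw [← hgj]; simp [List.getElem_cons_drop]⟩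
    rw [if_neg hfind, hidx]
    have hcast : (i : Int) + 1 = ((i + 1 : Nat) : Int) := by push_cast; ring
    rw [hcast, PySem.List.slice_to_natCast, PySem.List.slice_from_natCast]
    have hsplit : head.toList = head.toList.take i ++ '{' :: head.toList.drop (i + 1) := by
      conv_lhs => rw [← List.take_append_drop i head.toList]
      rw [hdrop]
    conv_lhs => rw [hsplit]
    rw [loopA_split _ _ htake]
    have htake1 : head.toList.take (i + 1) = head.toList.take i ++ ['{'] := by
      rw [List.take_add_one]
      simp [List.getElem?_eq_getElem hilen, hgetI]
    rw [htake1]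
    simp
  · have hfind : PySem.Chars.find head.toList ['{'] = -1 := by
      rw [PySem.Chars.find_eq_neg_one_iff, singleton_infix_iff]; exact hmem
    rw [if_pos hfind, loopA_no_brace _ hmem]
    simp

-- ===== VERDICT (by name: the statement is the Claim_ definition above) =====
theorem clean_key_spec : Claim_equal_clean_key := by
  intro bib _
  unfold Spec_clean_key clean_key clean_key_alt
  cases (PySem.Str.split? (PySem.Str.lstrip bib) "\n").getD [] with
  | nil => rfl
  | cons head rest =>
      show PySem.Str.join "\n" (String.ofList (cleanKeyLoopA false head.toList) :: rest) =
        PySem.Str.join "\n" (cleanKeyHeadB head :: rest)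
      rw [headA_eq_headB]
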